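-- pv_equiv track=rewrite | github.com/Route-Planner-Team/planner-backend | routes/route_repository.py | remove_half_duplicates
-- ===== SOURCE A (Python) =====
-- def remove_half_duplicates(depot_addresses):
--     counts = {}
--     result = []
--     for item in depot_addresses:
--         if item in counts:
--             if counts[item] > 1:
--                 result.append(item)
--                 counts[item] -= 1
--             else:
--                 del counts[item]
--         else:
--             counts[item] = 1
--             result.append(item)
--
--     return result
-- ===== SOURCE B (Python) =====
-- def remove_half_duplicates(depot_addresses):
--     # Dict-free cancellation scan: emit the head, then delete that value's
--     # next occurrence from the remaining list (it is the even occurrence).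
--     result = []
--     rest = list(depot_addresses)
--     while rest:
--         head = rest.pop(0)
--         result.append(head)
--         if head in rest:
--             rest.remove(head)
--     return result
-- ===== Notes on version B (the rewrite author's own statement) =====
-- stated objective: alternative
-- what changed: Replaces A's streaming presence-dict toggle by a dict-free destructive scan on a working copy: take the head, emit it, and delete that value's next (even) occurrence from the remainder, so no per-value state is kept at all.
import Mathlib
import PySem

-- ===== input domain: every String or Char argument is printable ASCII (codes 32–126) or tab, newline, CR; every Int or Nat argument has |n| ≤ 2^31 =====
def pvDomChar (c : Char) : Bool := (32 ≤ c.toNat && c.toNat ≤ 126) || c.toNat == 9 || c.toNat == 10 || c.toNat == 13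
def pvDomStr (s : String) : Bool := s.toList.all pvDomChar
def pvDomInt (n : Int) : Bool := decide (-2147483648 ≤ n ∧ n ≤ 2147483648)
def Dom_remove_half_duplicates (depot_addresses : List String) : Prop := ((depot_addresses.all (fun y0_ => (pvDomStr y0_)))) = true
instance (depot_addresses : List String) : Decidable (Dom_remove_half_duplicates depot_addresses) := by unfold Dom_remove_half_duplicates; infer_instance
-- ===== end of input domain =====

-- B replaces A's presence-dict toggle by a dict-free destructive scan (emit head,
-- delete that value's next occurrence from the remainder); objective: alternative.

-- ===== PORT A =====
-- one iteration of A's for-loop: state = (counts, result)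
def pvStepA (st : PySem.Dict String Int × List String) (item : String) :
    PySem.Dict String Int × List String :=
  if st.1.contains item then
    if st.1.getD item 0 > 1 then
      (st.1.insert item (st.1.getD item 0 - 1), st.2 ++ [item])
    else
      (st.1.erase item, st.2)
  else
    (st.1.insert item 1, st.2 ++ [item])

def remove_half_duplicates (depot_addresses : List String) : List String :=
  (depot_addresses.foldl pvStepA (PySem.Dict.empty, [])).2

-- ===== PORT B =====
-- B's while-loop: state = (result, rest); pop the head, append it, and if it still
-- occurs in rest remove its first occurrence (Python list.remove = List.erase).
def pvLoopB : List String → List String → List String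
  | res, [] => res
  | res, h :: t => pvLoopB (res ++ [h]) (if h ∈ t then t.erase h else t)
termination_by _ rest => rest.length
decreasing_by
  simp only [List.length_cons]
  split
  · exact Nat.lt_succ_of_le (List.length_erase_le)
  · exact Nat.lt_succ_self _

def remove_half_duplicates_alt (depot_addresses : List String) : List String :=
  pvLoopB [] depot_addresses

-- ===== PRECONDITION & SPEC =====
def Spec_remove_half_duplicates (depot_addresses : List String) (out : List String) : Prop := out = remove_half_duplicates_alt depot_addresses
instance (depot_addresses : List String) (out : List String) : Decidable (Spec_remove_half_duplicates depot_addresses out) := by unfold Spec_remove_half_duplicates; infer_instance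

-- ===== CLAIM (what is proved, stated in full; the proofs are below) =====
def Claim_equal_remove_half_duplicates : Prop := ∀ (depot_addresses : List String), Dom_remove_half_duplicates depot_addresses → Spec_remove_half_duplicates depot_addresses (remove_half_duplicates depot_addresses)

-- ===== LEMMAS AND PROOFS =====

-- reference function both ports are reduced to: S = set of values seen an odd
-- number of times so far; an element is kept iff it is NOT currently in S.
def pvSpec : Finset String → List String → List String
  | _, [] => []
  | S, h :: t => if h ∈ S then pvSpec (S.erase h) t else h :: pvSpec (insert h S) t

-- PySem.Dict has no erase lemmas; these are proved here from its definition.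
theorem dict_contains_erase_self {κ ν : Type} [BEq κ] [LawfulBEq κ]
    (d : PySem.Dict κ ν) (k : κ) : (d.erase k).contains k = false := by
  simp [PySem.Dict.erase, PySem.Dict.contains, List.any_filter]

theorem dict_contains_erase_of_ne {κ ν : Type} [BEq κ] [LawfulBEq κ]
    (d : PySem.Dict κ ν) (k k' : κ) (h : k' ≠ k) :
    (d.erase k).contains k' = d.contains k' := by
  obtain ⟨items⟩ := d
  simp only [PySem.Dict.erase, PySem.Dict.contains]
  induction items with
  | nil => rfl
  | cons p t ih =>
    rw [List.filter_cons, List.any_cons]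
    by_cases hk : p.1 = k
    · have h1 : (!(p.1 == k)) = false := by simp [hk]
      have h2 : (p.1 == k') = false := by simp [hk]; exact fun e => h e.symm
      rw [h1, if_neg (by simp), h2, Bool.false_or]; exact ih
    · have h1 : (!(p.1 == k)) = true := by simp [hk]
      rw [h1, if_pos rfl, List.any_cons, ih]

theorem dict_getD_erase_of_ne {κ ν : Type} [BEq κ] [LawfulBEq κ]
    (d : PySem.Dict κ ν) (k k' : κ) (v : ν) (h : k' ≠ k) :
    (d.erase k).getD k' v = d.getD k' v := by
  obtain ⟨items⟩ := d
  simp only [PySem.Dict.erase, PySem.Dict.getD, PySem.Dict.get?]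
  induction items with
  | nil => rfl
  | cons p t ih =>
    rw [List.filter_cons]
    by_cases hk : p.1 = k
    · have h1 : (!(p.1 == k)) = false := by simp [hk]
      have h2 : (p.1 == k') = false := by simp [hk]; exact fun e => h e.symm
      rw [h1, if_neg (by simp), List.find?_cons, h2]; exact ih
    · have h1 : (!(p.1 == k)) = true := by simp [hk]
      rw [h1, if_pos rfl, List.find?_cons, List.find?_cons]
      by_cases hp : p.1 = k'
      · rw [show (p.1 == k') = true by simp [hp]]
      · rw [show (p.1 == k') = false by simp [hp]]; exact ih

-- A side: the fold over pvStepA computes pvSpec, the dict standing for the set S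
theorem pvA_eq_spec (l : List String) (cA : PySem.Dict String Int) (res : List String)
    (S : Finset String)
    (h1 : ∀ k, cA.contains k = true ↔ k ∈ S)
    (h2 : ∀ k, cA.contains k = true → cA.getD k 0 = 1) :
    (l.foldl pvStepA (cA, res)).2 = res ++ pvSpec S l := by
  induction l generalizing cA S res with
  | nil => simp [pvSpec]
  | cons item t ih =>
    simp only [List.foldl_cons]
    by_cases hc : cA.contains item = true
    · have hmem : item ∈ S := (h1 item).mp hc
      have hval : cA.getD item 0 = 1 := h2 item hc
      have hA : pvStepA (cA, res) item = (cA.erase item, res) := by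
        simp [pvStepA, hc, hval]
      rw [hA, show pvSpec S (item :: t) = pvSpec (S.erase item) t by
        simp [pvSpec, hmem]]
      apply ih
      · intro k
        by_cases hk : k = item
        · subst hk; simp [dict_contains_erase_self]
        · rw [dict_contains_erase_of_ne cA item k hk, Finset.mem_erase]
          exact (h1 k).trans (by simp [hk])
      · intro k hk'
        by_cases hk : k = item
        · subst hk; simp [dict_contains_erase_self] at hk'
        · rw [dict_getD_erase_of_ne cA item k 0 hk]
          exact h2 k (by rwa [dict_contains_erase_of_ne cA item k hk] at hk')
    · have hmem : item ∉ S := fun hm => hc ((h1 item).mpr hm)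
      have hA : pvStepA (cA, res) item = (cA.insert item 1, res ++ [item]) := by
        simp [pvStepA, hc]
      rw [hA, show pvSpec S (item :: t) = item :: pvSpec (insert item S) t by
        simp [pvSpec, hmem], show res ++ item :: pvSpec (insert item S) t
          = (res ++ [item]) ++ pvSpec (insert item S) t by simp]
      apply ih
      · intro k
        by_cases hk : k = item
        · subst hk; simp [PySem.Dict.contains_insert_self]
        · rw [PySem.Dict.contains_insert, show (k == item) = false by simp [hk],
              Bool.false_or, Finset.mem_insert]
          exact (h1 k).trans (by simp [hk])
      · intro k hk'
        by_cases hk : k = item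
        · subst hk; simp [PySem.Dict.getD_insert_self]
        · rw [PySem.Dict.getD_insert_of_ne cA 1 0 hk]
          apply h2 k
          rw [PySem.Dict.contains_insert] at hk'
          simpa [hk] using hk'

-- B side key lemma: inserting h into S is the same as erasing h's next
-- occurrence from the input
theorem pvSpec_insert_erase (t : List String) (S : Finset String) (h : String)
    (hS : h ∉ S) : pvSpec (insert h S) t = pvSpec S (t.erase h) := by
  induction t generalizing S with
  | nil => simp [pvSpec]
  | cons a t' ih =>
    by_cases hah : a = h
    · subst hah
      simp [pvSpec, List.erase_cons_head, Finset.erase_insert hS, hS]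
    · rw [List.erase_cons_tail (by simp [hah])]
      by_cases haS : a ∈ S
      · have h1 : a ∈ insert h S := Finset.mem_insert_of_mem haS
        rw [show pvSpec (insert h S) (a :: t') = pvSpec ((insert h S).erase a) t' by
              simp [pvSpec, h1],
            Finset.erase_insert_of_ne (fun e => hah e.symm),
            show pvSpec S (a :: t'.erase h) = pvSpec (S.erase a) (t'.erase h) by
              simp [pvSpec, haS]]
        exact ih _ (fun hm => hS (Finset.mem_of_mem_erase hm))
      · have h1 : a ∉ insert h S := by
          simp [Finset.mem_insert, hah, haS]
        rw [show pvSpec (insert h S) (a :: t') = a :: pvSpec (insert a (insert h S)) t' by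
              simp [pvSpec, h1],
            Finset.insert_comm a h S,
            show pvSpec S (a :: t'.erase h) = a :: pvSpec (insert a S) (t'.erase h) by
              simp [pvSpec, haS]]
        congr 1
        exact ih _ (by simp [Finset.mem_insert, hS]; exact fun e => hah e.symm)

-- B side: the while-loop computes pvSpec from the empty set
theorem pvB_eq_spec (l : List String) (res : List String) :
    pvLoopB res l = res ++ pvSpec ∅ l := by
  induction hn : l.length using Nat.strong_induction_on generalizing l res with
  | _ n ih =>
    match l with
    | [] => simp [pvLoopB, pvSpec]
    | h :: t =>
      have herase : (if h ∈ t then t.erase h else t) = t.erase h := by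
        split
        · rfl
        · exact (List.erase_of_not_mem (by assumption)).symm
      rw [pvLoopB, herase,
          ih (t.erase h).length
            (by subst hn; simpa using Nat.lt_succ_of_le (List.length_erase_le))
            _ _ rfl,
          show pvSpec ∅ (h :: t) = h :: pvSpec (insert h ∅) t by simp [pvSpec],
          pvSpec_insert_erase t ∅ h (by simp)]
      simp

-- ===== VERDICT (by name: the statement is the Claim_ definition above) =====
theorem remove_half_duplicates_spec : Claim_equal_remove_half_duplicates := by
  intro l _
  unfold Spec_remove_half_duplicates remove_half_duplicates remove_half_duplicates_alt
  rw [pvA_eq_spec l PySem.Dict.empty [] ∅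
        (fun k => by simp [PySem.Dict.contains_empty])
        (fun k hk => by simp [PySem.Dict.contains_empty] at hk),
      pvB_eq_spec]
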